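-- pv_equiv track=rewrite | github.com/choijaehoon1/programmers_level | src/test36.py | ten_trans
-- ===== SOURCE A (Python) =====
-- def ten_trans(str_n):
--     num = 0
--     three = 1
--     for i in range(len(str_n)-1,-1,-1):
--         if str_n[i] != '0':
--             num += int(str_n[i]) * three
--         three *= 3
--     return num
-- ===== SOURCE B (Python) =====
-- def ten_trans(str_n):
--     # Horner's method, left-to-right: no power-of-3 accumulator, no index loop.
--     num = 0
--     for c in str_n:
--         num = num * 3 + int(c)
--     return num
-- ===== Notes on version B (the rewrite author's own statement) =====
-- stated objective: idiomatic
-- what changed: Replaces the reversed-index loop maintaining a power-of-3 accumulator (and a skip-'0' branch) with a left-to-right Horner fold num = num*3 + int(c).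
import Mathlib
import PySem

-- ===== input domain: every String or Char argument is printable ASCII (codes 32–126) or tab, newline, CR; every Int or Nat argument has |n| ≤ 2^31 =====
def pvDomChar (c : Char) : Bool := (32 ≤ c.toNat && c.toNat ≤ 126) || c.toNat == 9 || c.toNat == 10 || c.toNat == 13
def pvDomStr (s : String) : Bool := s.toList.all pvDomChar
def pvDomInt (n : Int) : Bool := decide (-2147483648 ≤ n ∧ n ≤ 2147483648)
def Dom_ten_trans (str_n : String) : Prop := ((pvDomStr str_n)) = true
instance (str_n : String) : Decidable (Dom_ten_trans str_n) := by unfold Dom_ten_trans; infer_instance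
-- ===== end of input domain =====

-- B replaces A's reversed-index loop with a power-of-3 accumulator by a left-to-right Horner fold (idiomatic).

-- ===== PORT A =====
-- int(str_n[i]) on a one-char string: PySem.Int.ofChars? [c]; .getD 0 is only reached
-- outside Pre_ (non-digit char), where the Python raises ValueError.
-- The index i always lies in range(len), so pyGetD's default ' ' is never used.
def ten_trans (str_n : String) : Int :=
  let l := str_n.toList
  ((PySem.List.pyRange ((PySem.Str.len str_n) - 1) (-1) (-1)).foldl
    (fun (st : Int × Int) (i : Int) =>
      let c := PySem.List.pyGetD l i ' '
      (if c ≠ '0' then st.1 + ((PySem.Int.ofChars? [c]).getD 0) * st.2 else st.1,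
       st.2 * 3))
    (0, 1)).1

-- ===== PORT B =====
def ten_trans_alt (str_n : String) : Int :=
  str_n.toList.foldl (fun num c => num * 3 + (PySem.Int.ofChars? [c]).getD 0) 0

-- ===== PRECONDITION & SPEC =====
-- Pre_ excludes strings containing a non-digit character, on which Python's int() raises ValueError (in both A and B).
def Pre_ten_trans (str_n : String) : Prop := str_n.toList.all PySem.Chars.isdigit = true
instance (str_n : String) : Decidable (Pre_ten_trans str_n) := by unfold Pre_ten_trans; infer_instance
def pvWitness_ten_trans : String := "1202"
def Spec_ten_trans (str_n : String) (out : Int) : Prop := out = ten_trans_alt str_n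
instance (str_n : String) (out : Int) : Decidable (Spec_ten_trans str_n out) := by unfold Spec_ten_trans; infer_instance

-- ===== CLAIM (what is proved, stated in full; the proofs are below) =====
def Claim_equal_ten_trans : Prop := ∀ (str_n : String), Dom_ten_trans str_n → Pre_ten_trans str_n → Spec_ten_trans str_n (ten_trans str_n)

-- ===== LEMMAS AND PROOFS =====

-- digit value used by both ports
def pvDv (c : Char) : Int := (PySem.Int.ofChars? [c]).getD 0

theorem pvDv_zero : pvDv '0' = 0 := by decide

-- A's skip-'0' branch computes the same as the uniform update with pvDv '0' = 0
theorem step_uniform (c : Char) (n t : Int) :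
    (if c ≠ '0' then n + pvDv c * t else n) = n + pvDv c * t := by
  by_cases h : c = '0'
  · subst h; simp [pvDv_zero]
  · simp [h]

-- A's countdown loop over any list, with arbitrary start state
theorem loopA (l : List Char) (n t : Int) :
    (PySem.List.pyRange ((l.length : Int) - 1) (-1) (-1)).foldl
      (fun (st : Int × Int) (i : Int) =>
        let c := PySem.List.pyGetD l i ' '
        (if c ≠ '0' then st.1 + ((PySem.Int.ofChars? [c]).getD 0) * st.2 else st.1,
         st.2 * 3))
      (n, t)
    = (n + (l.foldl (fun num c => num * 3 + (PySem.Int.ofChars? [c]).getD 0) 0) * t,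
       t * 3 ^ l.length) := by
  induction l using List.reverseRecOn generalizing n t with
  | nil =>
      rw [PySem.List.pyRange_neg_one_eq_nil (by norm_num)]
      simp
  | append_singleton xs a ih =>
      have hlen : ((xs ++ [a]).length : Int) - 1 = (xs.length : Int) := by
        simp
      rw [hlen, PySem.List.pyRange_neg_one_cons (by omega)]
      simp only [List.foldl_cons]
      have hget : PySem.List.pyGetD (xs ++ [a]) (xs.length : Int) ' ' = a := by
        rw [PySem.List.pyGetD_natCast]
        simp
      rw [hget]
      have hcongr :
          (PySem.List.pyRange ((xs.length : Int) - 1) (-1) (-1)).foldl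
            (fun (st : Int × Int) (i : Int) =>
              let c := PySem.List.pyGetD (xs ++ [a]) i ' '
              (if c ≠ '0' then st.1 + ((PySem.Int.ofChars? [c]).getD 0) * st.2 else st.1,
               st.2 * 3))
            (if a ≠ '0' then n + ((PySem.Int.ofChars? [a]).getD 0) * t else n, t * 3)
          = (PySem.List.pyRange ((xs.length : Int) - 1) (-1) (-1)).foldl
            (fun (st : Int × Int) (i : Int) =>
              let c := PySem.List.pyGetD xs i ' '
              (if c ≠ '0' then st.1 + ((PySem.Int.ofChars? [c]).getD 0) * st.2 else st.1,
               st.2 * 3))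
            (if a ≠ '0' then n + ((PySem.Int.ofChars? [a]).getD 0) * t else n, t * 3) := by
        apply PySem.List.foldl_congr_mem
        intro acc i hi
        have hmem := (PySem.List.mem_pyRange_neg_one (x := i)).mp hi
        have h0 : 0 ≤ i := by omega
        have hlt : i < (xs.length : Int) := by omega
        obtain ⟨k, rfl⟩ : ∃ k : Nat, i = (k : Int) := ⟨i.toNat, (Int.toNat_of_nonneg h0).symm⟩
        have hk : k < xs.length := by exact_mod_cast hlt
        have : PySem.List.pyGetD (xs ++ [a]) (k : Int) ' ' = PySem.List.pyGetD xs (k : Int) ' ' := by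
          simp only [PySem.List.pyGetD_natCast]
          simp [List.getD, List.getElem?_append_left hk]
        rw [this]
      rw [hcongr, ih]
      have ha := step_uniform a n t
      simp only [pvDv] at ha
      rw [ha, List.foldl_append, List.foldl_cons, List.foldl_nil, List.length_append]
      simp only [List.length_singleton]
      simp only [Prod.mk.injEq]
      constructor <;> ring
  
-- ===== VERDICT (by name: the statement is the Claim_ definition above) =====
theorem ten_trans_spec : Claim_equal_ten_trans := by
  intro s _ _
  unfold Spec_ten_trans ten_trans ten_trans_alt
  have h := loopA s.toList 0 1
  simp only [PySem.Str.len_eq] at *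
  rw [h]
  ring
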